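-- pv_equiv track=rewrite | github.com/w1xs/all_python_labs | laba_7/quest_3.py | get_moda_of_mass
-- ===== SOURCE A (Python) =====
-- def get_moda_of_mass(dictionary: dict):
--     res = -1
--     biggest_number = -1
--     for key in dictionary.keys():
--         if dictionary[key] > biggest_number:
--             res = key
--             biggest_number = dictionary[key]
--
--     for key in dictionary.keys():
--         if (dictionary[key] == biggest_number) and (key != res):
--             return -1
--
--     return res
-- ===== SOURCE B (Python) =====
-- def get_moda_of_mass(dictionary: dict):
--     best_key, best_val, tie = -1, -1, False
--     for k, v in dictionary.items():
--         if v > best_val: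
--             best_key, best_val, tie = k, v, False
--         elif v == best_val:
--             tie = True
--     return -1 if tie else best_key
-- ===== Notes on version B (the rewrite author's own statement) =====
-- stated objective: simpler
-- what changed: A's two passes (find the max, then rescan the whole dict for a second key with that value) are replaced by a single pass over items() that maintains (best_key, best_val, tie) and resets the tie flag on every strict improvement.
import Mathlib
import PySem

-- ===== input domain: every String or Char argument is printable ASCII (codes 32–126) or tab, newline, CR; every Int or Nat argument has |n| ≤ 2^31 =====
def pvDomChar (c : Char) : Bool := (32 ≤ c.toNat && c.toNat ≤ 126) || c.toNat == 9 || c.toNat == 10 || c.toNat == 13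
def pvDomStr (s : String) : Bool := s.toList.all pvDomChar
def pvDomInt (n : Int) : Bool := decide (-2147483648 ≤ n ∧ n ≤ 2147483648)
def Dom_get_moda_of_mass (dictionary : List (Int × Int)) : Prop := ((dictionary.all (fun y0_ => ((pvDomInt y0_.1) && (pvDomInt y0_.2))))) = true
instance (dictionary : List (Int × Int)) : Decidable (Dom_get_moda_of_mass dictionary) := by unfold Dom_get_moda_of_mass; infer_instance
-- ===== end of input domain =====

-- B replaces A's two passes (find max, then rescan for a tying second key) by one pass
-- maintaining (best_key, best_val, tie); objective: simpler.

-- ===== PORT A =====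
-- dictionary[key]: first-match lookup (keys are unique under Pre_); 0 is never reached
-- because every looked-up key comes from the dictionary itself.
def pyLookup (d : List (Int × Int)) (k : Int) : Int :=
  match d.find? (fun p => p.1 == k) with
  | some p => p.2
  | none => 0

def amLoop1 (d : List (Int × Int)) : List Int → Int × Int → Int × Int
  | [], st => st
  | k :: ks, (res, big) =>
      if pyLookup d k > big then amLoop1 d ks (k, pyLookup d k)
      else amLoop1 d ks (res, big)

def amLoop2 (d : List (Int × Int)) (res big : Int) : List Int → Int
  | [] => res
  | k :: ks => if pyLookup d k == big && k != res then -1 else amLoop2 d res big ks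

def get_moda_of_mass (dictionary : List (Int × Int)) : Int :=
  let st := amLoop1 dictionary (dictionary.map Prod.fst) (-1, -1)
  amLoop2 dictionary st.1 st.2 (dictionary.map Prod.fst)

-- ===== PORT B =====
def bStep (st : Int × Int × Bool) (p : Int × Int) : Int × Int × Bool :=
  if p.2 > st.2.1 then (p.1, p.2, false)
  else if p.2 = st.2.1 then (st.1, st.2.1, true)
  else st

def get_moda_of_mass_alt (dictionary : List (Int × Int)) : Int :=
  let st := dictionary.foldl bStep (-1, -1, false)
  if st.2.2 then -1 else st.1

-- ===== PRECONDITION & SPEC =====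
-- Pre_ requires distinct keys: the association list models a Python dict, whose keys are
-- unique, so duplicate-key lists correspond to no Python input.
def Pre_get_moda_of_mass (dictionary : List (Int × Int)) : Prop :=
  (dictionary.map Prod.fst).Nodup
instance (dictionary : List (Int × Int)) : Decidable (Pre_get_moda_of_mass dictionary) := by
  unfold Pre_get_moda_of_mass; infer_instance

def pvWitness_get_moda_of_mass : (List (Int × Int)) := [(1, 3), (2, 1)]

def Spec_get_moda_of_mass (dictionary : List (Int × Int)) (out : Int) : Prop := out = get_moda_of_mass_alt dictionary
instance (dictionary : List (Int × Int)) (out : Int) : Decidable (Spec_get_moda_of_mass dictionary out) := by unfold Spec_get_moda_of_mass; infer_instance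

-- ===== CLAIM (what is proved, stated in full; the proofs are below) =====
def Claim_equal_get_moda_of_mass : Prop := ∀ (dictionary : List (Int × Int)), Dom_get_moda_of_mass dictionary → Pre_get_moda_of_mass dictionary → Spec_get_moda_of_mass dictionary (get_moda_of_mass dictionary)

-- ===== LEMMAS AND PROOFS =====

-- pair-level version of A's first loop
def afStep (st : Int × Int) (p : Int × Int) : Int × Int :=
  if p.2 > st.2 then (p.1, p.2) else st

theorem lookup_of_mem (d : List (Int × Int)) (hnd : (d.map Prod.fst).Nodup)
    (p : Int × Int) (hp : p ∈ d) : pyLookup d p.1 = p.2 := by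
  induction d with
  | nil => cases hp
  | cons q d ih =>
    simp only [List.map_cons, List.nodup_cons] at hnd
    rcases List.mem_cons.mp hp with h | h
    · subst h
      unfold pyLookup
      rw [List.find?_cons_of_pos (by simp)]
    · have hne : q.1 ≠ p.1 := fun he => hnd.1 (he ▸ List.mem_map_of_mem h)
      have := ih hnd.2 h
      unfold pyLookup at this ⊢
      rw [List.find?_cons_of_neg (by simp [hne])]
      exact this

theorem loop1_eq (d : List (Int × Int)) :
    ∀ (s : List (Int × Int)) (st : Int × Int),
      (∀ p ∈ s, pyLookup d p.1 = p.2) →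
      amLoop1 d (s.map Prod.fst) st = s.foldl afStep st := by
  intro s
  induction s with
  | nil => intro st _; rfl
  | cons p s ih =>
    intro st h
    have hp := h p (List.mem_cons_self ..)
    have hs : ∀ q ∈ s, pyLookup d q.1 = q.2 := fun q hq => h q (List.mem_cons_of_mem _ hq)
    obtain ⟨r, b⟩ := st
    simp only [List.map_cons, amLoop1, hp, List.foldl_cons, afStep]
    by_cases hgt : p.2 > b
    · simp only [if_pos hgt, ih _ hs]
    · simp only [if_neg hgt, ih _ hs]

theorem loop2_eq (d : List (Int × Int)) :
    ∀ (s : List (Int × Int)) (r b : Int),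
      (∀ p ∈ s, pyLookup d p.1 = p.2) →
      amLoop2 d r b (s.map Prod.fst) =
        (if s.any (fun p => p.2 == b && p.1 != r) then -1 else r) := by
  intro s
  induction s with
  | nil => intro r b _; rfl
  | cons p s ih =>
    intro r b h
    have hp := h p (List.mem_cons_self ..)
    have hs : ∀ q ∈ s, pyLookup d q.1 = q.2 := fun q hq => h q (List.mem_cons_of_mem _ hq)
    simp only [List.map_cons, amLoop2, hp, List.any_cons]
    by_cases hc : (p.2 == b && p.1 != r) = true
    · simp [hc]
    · have hc' : (p.2 == b && p.1 != r) = false := by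
        simp only [Bool.not_eq_true] at hc; exact hc
      rw [if_neg (by simp [hc']), ih _ _ hs]
      simp only [hc', Bool.false_or]

theorem af_stay (s : List (Int × Int)) : ∀ st : Int × Int,
    s.foldl afStep st = st ∨ st.2 < (s.foldl afStep st).2 := by
  induction s with
  | nil => intro st; exact Or.inl rfl
  | cons p s ih =>
    intro st
    simp only [List.foldl_cons, afStep]
    by_cases hgt : p.2 > st.2
    · rw [if_pos hgt]
      right
      rcases ih (p.1, p.2) with h | h
      · rw [h]; exact hgt
      · exact lt_trans hgt h
    · rw [if_neg hgt]
      exact ih st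

-- main invariant: B's continuation from (r,b,t) computes A's two-pass answer over the suffix
theorem main_inv : ∀ (s : List (Int × Int)) (r b : Int) (t : Bool),
    (s.map Prod.fst).Nodup → (b ≠ -1 → r ∉ s.map Prod.fst) → (b = -1 → r = -1) → -1 ≤ b →
    (let st := s.foldl bStep (r, b, t); if st.2.2 then -1 else st.1) =
      (let fs := s.foldl afStep (r, b);
       if s.any (fun p => p.2 == fs.2 && p.1 != fs.1) || (t && (fs.2 == b)) then -1 else fs.1) := by
  intro s
  induction s with
  | nil =>
    intro r b t _ _ _ _
    simp
  | cons p s ih =>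
    obtain ⟨k, v⟩ := p
    intro r b t hnd h1 h2 h3
    simp only [List.map_cons, List.nodup_cons] at hnd
    simp only [List.foldl_cons, List.any_cons, bStep, afStep]
    by_cases hgt : v > b
    · -- strict improvement: new state (k, v, false)
      simp only [if_pos hgt]
      have hih := ih k v false hnd.2 (fun _ => hnd.1) (fun he => by omega) (by omega)
      simp only at hih
      rw [hih]
      set fs := s.foldl afStep (k, v) with hfs
      have hA : (v == fs.2 && k != fs.1) = false := by
        rcases af_stay s (k, v) with h | h
        · rw [← hfs] at h
          rw [h]
          simp
        · rw [← hfs] at h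
          simp only at h
          have : (v == fs.2) = false := by simp only [beq_eq_false_iff_ne, ne_eq]; omega
          simp [this]
      have hB : (fs.2 == b) = false := by
        rcases af_stay s (k, v) with h | h
        · rw [← hfs] at h
          rw [h]
          simp only [beq_eq_false_iff_ne, ne_eq]
          omega
        · rw [← hfs] at h
          simp only at h
          simp only [beq_eq_false_iff_ne, ne_eq]
          omega
      simp only [hA, hB, Bool.false_and, Bool.false_or, Bool.and_false, Bool.or_false]
    · by_cases heq : v = b
      · -- tie with the running best: tie flag set
        simp only [if_neg hgt, if_pos heq]
        have hih := ih r b true hnd.2 (fun hb hm => h1 hb (List.mem_cons_of_mem _ hm)) h2 h3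
        simp only at hih
        rw [hih]
        set fs := s.foldl afStep (r, b) with hfs
        by_cases hany : s.any (fun q => q.2 == fs.2 && q.1 != fs.1) = true
        · simp only [hany, Bool.true_or, Bool.or_true]
        · have hany' : s.any (fun q => q.2 == fs.2 && q.1 != fs.1) = false := by
            simp only [Bool.not_eq_true] at hany; exact hany
          by_cases hBv : fs.2 = b
          · have hfsr : fs = (r, b) := by
              rcases af_stay s (r, b) with h' | h'
              · rw [← hfs] at h'; exact h'
              · rw [← hfs] at h'; exfalso; omega
            by_cases hkr : k = r
            · have hbneg : b = -1 := by
                by_contra hb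
                exact h1 hb (by rw [List.map_cons]; exact hkr ▸ List.mem_cons_self ..)
              have hr : r = -1 := h2 hbneg
              simp [hfsr, hr]
            · simp [hfsr, heq, hkr]
          · have h5 : (fs.2 == b) = false := by
              simp only [beq_eq_false_iff_ne, ne_eq]; exact hBv
            have h6 : (v == fs.2) = false := by
              simp only [beq_eq_false_iff_ne, ne_eq]
              exact fun hc => hBv (heq ▸ hc).symm
            simp [hany', h5, h6]
      · -- v < b: state unchanged
        simp only [if_neg hgt, if_neg heq]
        have hih := ih r b t hnd.2 (fun hb hm => h1 hb (List.mem_cons_of_mem _ hm)) h2 h3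
        simp only at hih
        rw [hih]
        set fs := s.foldl afStep (r, b) with hfs
        have hle : b ≤ fs.2 := by
          rcases af_stay s (r, b) with h' | h'
          · rw [← hfs] at h'; rw [h']
          · rw [← hfs] at h'; omega
        have hv : (v == fs.2) = false := by
          simp only [beq_eq_false_iff_ne, ne_eq]; omega
        simp only [hv, Bool.false_and, Bool.false_or]

-- ===== VERDICT (by name: the statement is the Claim_ definition above) =====
theorem get_moda_of_mass_spec : Claim_equal_get_moda_of_mass := by
  intro d _ hpre
  unfold Spec_get_moda_of_mass get_moda_of_mass get_moda_of_mass_alt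
  have hlk : ∀ p ∈ d, pyLookup d p.1 = p.2 := fun p hp => lookup_of_mem d hpre p hp
  rw [loop1_eq d d _ hlk, loop2_eq d d _ _ hlk]
  have := main_inv d (-1) (-1) false hpre (fun h => absurd rfl h) (fun _ => rfl) le_rfl
  simp only [Bool.false_and, Bool.or_false] at this
  exact this.symm
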